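-- pv_equiv track=rewrite | github.com/ShlomiRex/leetcode | Medium/402. Remove K Digits/version2.py | remove1Digit
-- ===== SOURCE A (Python) =====
-- def remove1Digit(num: str) -> str:
--     prev_digit = num[0]
--     for i in range(1, len(num)):
--         curr_digit = num[i]
--         # If increasing or equal to
--         if curr_digit >= prev_digit:
--             # Keep scanning
--             pass
--         # If decreasing
--         elif curr_digit < prev_digit or curr_digit == "0":
--             # Then remove previous digit
--             return num[:i-1] + num[i:]
--         prev_digit = curr_digit
--     return num[:-1]
-- ===== SOURCE B (Python) =====
-- def remove1Digit(num: str) -> str: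
--     return min(num[:i] + num[i + 1:] for i in range(len(num)))
-- ===== Notes on version B (the rewrite author's own statement) =====
-- stated objective: simpler
-- what changed: Replaced A's greedy scan for the first descent (with slice surgery and an end-of-loop fallback) by a one-line generate-and-minimise: build every single-character removal num[:i]+num[i+1:] and return the lexicographic min, which equals A's greedy choice since all candidates have equal length.
import Mathlib
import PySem

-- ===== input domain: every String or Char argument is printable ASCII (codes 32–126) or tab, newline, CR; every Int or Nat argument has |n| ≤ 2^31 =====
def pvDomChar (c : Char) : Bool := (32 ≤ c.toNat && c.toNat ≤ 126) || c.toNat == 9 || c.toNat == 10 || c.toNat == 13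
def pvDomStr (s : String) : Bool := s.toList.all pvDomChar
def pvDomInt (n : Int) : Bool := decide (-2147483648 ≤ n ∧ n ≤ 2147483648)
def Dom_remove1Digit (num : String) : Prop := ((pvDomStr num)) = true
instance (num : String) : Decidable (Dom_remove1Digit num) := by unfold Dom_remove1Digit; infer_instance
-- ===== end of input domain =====

-- B replaces A's greedy first-descent scan by "min over all single-character removals" (same return value; objective: simpler).

-- ===== PORT A =====
-- the for-loop of A, recursing over the remaining indices of range(1, len(num));
-- prev is A's prev_digit (the `none` fallbacks are unreachable: every i is in range)
def remove1DigitLoop (s : List Char) : List Int → Char → List Char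
  | [], _ => PySem.List.slice s none (some (-1))                  -- return num[:-1]
  | i :: is, prev =>
    match PySem.List.pyGet? s i with
    | none => []
    | some curr =>
      if prev ≤ curr then remove1DigitLoop s is curr              -- curr_digit >= prev_digit: pass
      else if curr < prev ∨ curr = '0' then                       -- elif curr < prev or curr == "0"
        PySem.List.slice s none (some (i - 1)) ++ PySem.List.slice s (some i) none  -- num[:i-1] + num[i:]
      else remove1DigitLoop s is curr

def remove1Digit (num : String) : String :=
  match PySem.List.pyGet? num.toList 0 with                       -- prev_digit = num[0] (none = IndexError, outside Pre_)
  | none => ""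
  | some prev =>
    String.ofList (remove1DigitLoop num.toList
      (PySem.List.pyRange 1 (PySem.Str.len num) 1) prev)

-- ===== PORT B =====
def remove1Digit_alt (num : String) : String :=
  let s := num.toList
  let cands := (PySem.List.pyRange 0 (PySem.Str.len num) 1).map
    (fun i => PySem.List.slice s none (some i) ++ PySem.List.slice s (some (i + 1)) none)  -- num[:i] + num[i+1:]
  match PySem.List.min? cands (fun x => x) with                   -- min(...) (none = ValueError on empty, outside Pre_)
  | some m => String.ofList m
  | none => ""

-- ===== PRECONDITION & SPEC =====
-- Pre_ excludes only the empty string, on which A raises IndexError (and B ValueError).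
def Pre_remove1Digit (num : String) : Prop := num ≠ ""
instance (num : String) : Decidable (Pre_remove1Digit num) := by unfold Pre_remove1Digit; infer_instance

def pvWitness_remove1Digit : String := "1432219"

def Spec_remove1Digit (num : String) (out : String) : Prop := out = remove1Digit_alt num
instance (num : String) (out : String) : Decidable (Spec_remove1Digit num out) := by unfold Spec_remove1Digit; infer_instance

-- ===== CLAIM (what is proved, stated in full; the proofs are below) =====
def Claim_equal_remove1Digit : Prop := ∀ (num : String), Dom_remove1Digit num → Pre_remove1Digit num → Spec_remove1Digit num (remove1Digit num)

-- ===== LEMMAS AND PROOFS =====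

-- the greedy result, as a structural recursion on the characters (proof-only helper)
def grSpec : List Char → List Char
  | [] => []
  | [_] => []
  | c :: d :: t => if d < c then d :: t else c :: grSpec (d :: t)

-- all single-removal candidates, structurally (proof-only helper)
def candsL : List Char → List (List Char)
  | [] => []
  | c :: t => t :: (candsL t).map (c :: ·)

lemma candsL_eq_range (s : List Char) :
    candsL s = (List.range s.length).map (s.eraseIdx ·) := by
  induction s with
  | nil => simp [candsL]
  | cons c t ih =>
    simp [candsL, ih, List.range_succ_eq_map, List.map_map, Function.comp_def]

lemma grSpec_mem (s : List Char) (hs : s ≠ []) : grSpec s ∈ candsL s := by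
  induction s with
  | nil => exact absurd rfl hs
  | cons c t ih =>
    cases t with
    | nil => simp [grSpec, candsL]
    | cons d t' =>
      by_cases hdc : d < c
      · simp [grSpec, hdc, candsL]
      · have h := ih (by simp)
        simp only [grSpec, if_neg hdc, candsL]
        exact List.mem_cons_of_mem _ (List.mem_map_of_mem h)

lemma grSpec_min (s : List Char) : ∀ y ∈ candsL s, grSpec s ≤ y := by
  induction s with
  | nil => simp [candsL]
  | cons c t ih =>
    intro y hy
    cases t with
    | nil =>
      rcases List.mem_cons.mp hy with rfl | h
      · exact le_refl _
      · simp [candsL] at h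
    | cons d t' =>
      rcases List.mem_cons.mp hy with rfl | hy'
      · -- y = d :: t'
        by_cases hdc : d < c
        · simp [grSpec, hdc]
        · rcases lt_or_eq_of_le (le_of_not_gt hdc) with hlt | rfl
          · exact le_of_lt (by simp [List.cons_lt_cons_iff, grSpec, hdc, hlt])
          · have ht' : grSpec (c :: t') ≤ t' := ih t' (List.mem_cons_self ..)
            simpa [grSpec, hdc] using List.cons_le_cons c ht'
      · -- y = c :: y' with y' a candidate of the tail
        rcases List.mem_map.mp hy' with ⟨y', hy'', rfl⟩
        by_cases hdc : d < c
        · exact le_of_lt (by simp [List.cons_lt_cons_iff, grSpec, hdc])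
        · simpa [grSpec, hdc] using List.cons_le_cons c (ih y' hy'')

lemma take_succ_append (s : List Char) (k : Nat) (hk : k < s.length) (X : List Char) :
    s.take (k + 1) ++ X = s.take k ++ s[k] :: X := by
  induction s generalizing k with
  | nil => simp at hk
  | cons a t ih =>
    cases k with
    | zero => simp
    | succ k =>
      simp only [List.take_succ_cons, List.getElem_cons_succ, List.cons_append]
      exact congrArg (a :: ·) (ih k (by simpa using hk))

-- unfolding equation of A's loop at a cons index (definitional)
lemma remove1DigitLoop_cons_some (s : List Char) (i : Int) (is : List Int) (prev curr : Char)
    (h : PySem.List.pyGet? s i = some curr) :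
    remove1DigitLoop s (i :: is) prev =
      if prev ≤ curr then remove1DigitLoop s is curr
      else if curr < prev ∨ curr = '0' then
        PySem.List.slice s none (some (i - 1)) ++ PySem.List.slice s (some i) none
      else remove1DigitLoop s is curr := by
  simp only [remove1DigitLoop, h]

-- A's loop, started at position k with prev = s[k], keeps s.take k and runs grSpec on the rest
lemma remove1DigitLoop_eq (s : List Char) :
    ∀ m k (hk : k < s.length), s.length - k = m →
      remove1DigitLoop s (PySem.List.pyRange ((k : Int) + 1) (s.length : Int) 1) s[k] =
        s.take k ++ grSpec (s.drop k) := by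
  intro m
  induction m with
  | zero => intro k hk hm; omega
  | succ m ih =>
    intro k hk hm
    by_cases hlast : k + 1 = s.length
    · -- the range is empty: A returns num[:-1]
      rw [PySem.List.pyRange_one_eq_nil (by omega)]
      have hdrop : s.drop k = [s[k]] := by
        rw [List.drop_eq_getElem_cons hk, List.drop_eq_nil_of_le (by omega)]
      simp only [remove1DigitLoop, PySem.List.slice_to_neg_one, hdrop, grSpec,
        List.dropLast_eq_take, List.append_nil]
      congr 1
      omega
    · have hk1 : k + 1 < s.length := by omega
      rw [PySem.List.pyRange_one_cons (by exact_mod_cast by omega)]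
      have hcast : ((k : Int) + 1) = ((k + 1 : Nat) : Int) := by push_cast; ring
      have hget : PySem.List.pyGet? s ((k : Int) + 1) = some s[k + 1] := by
        rw [hcast, PySem.List.pyGet?_natCast]
        exact List.getElem?_eq_getElem hk1
      have hdropk : s.drop k = s[k] :: s.drop (k + 1) := List.drop_eq_getElem_cons hk
      have hdropk1 : s.drop (k + 1) = s[k + 1] :: s.drop (k + 2) := List.drop_eq_getElem_cons hk1
      rw [remove1DigitLoop_cons_some s _ _ _ _ hget]
      by_cases hle : s[k] ≤ s[k + 1]
      · -- nondecreasing step: keep scanning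
        simp only [if_pos hle]
        have hrec : ((k : Int) + 1) + 1 = ((k + 1 : Nat) : Int) + 1 := by push_cast; ring
        rw [hrec, ih (k + 1) hk1 (by omega)]
        have hnot : ¬ s[k + 1] < s[k] := not_lt.mpr hle
        rw [hdropk, hdropk1]
        simp only [grSpec, if_neg hnot, ← hdropk1]
        exact take_succ_append s k hk _
      · -- descent: remove the previous character
        have hlt : s[k + 1] < s[k] := lt_of_not_ge hle
        simp only [if_neg hle, if_pos (Or.inl hlt)]
        have h1 : ((k : Int) + 1) - 1 = ((k : Nat) : Int) := by ring
        rw [h1, PySem.List.slice_to_natCast, hcast, PySem.List.slice_from_natCast]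
        rw [hdropk, hdropk1]
        simp [grSpec, hlt, ← hdropk1]

-- B's candidate list is candsL
lemma cands_eq (s : List Char) :
    (PySem.List.pyRange 0 ((s.length : Int)) 1).map
      (fun i => PySem.List.slice s none (some i) ++ PySem.List.slice s (some (i + 1)) none) =
    candsL s := by
  rw [candsL_eq_range, PySem.List.pyRange_zero_nat, List.map_map]
  apply List.map_congr_left
  intro i _
  simp only [Function.comp_apply, PySem.List.slice_to_natCast]
  have : ((i : Int) + 1) = ((i + 1 : Nat) : Int) := by push_cast; ring
  rw [this, PySem.List.slice_from_natCast, List.eraseIdx_eq_take_drop_succ]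

-- ===== VERDICT (by name: the statement is the Claim_ definition above) =====
theorem remove1Digit_spec : Claim_equal_remove1Digit := by
  intro num _ hpre
  unfold Spec_remove1Digit
  have hs : num.toList ≠ [] := by
    intro h
    apply hpre
    cases num; simp_all
  obtain ⟨c, t, hct⟩ := List.exists_cons_of_ne_nil hs
  have hlen : 0 < num.toList.length := by rw [hct]; simp
  -- evaluate A
  have hget0 : PySem.List.pyGet? num.toList 0 = some (num.toList[0]'hlen) := by
    rw [show (0 : Int) = ((0 : Nat) : Int) from rfl, PySem.List.pyGet?_natCast]
    exact List.getElem?_eq_getElem hlen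
  have hA : remove1Digit num = String.ofList (grSpec num.toList) := by
    unfold remove1Digit
    rw [hget0]
    simp only [PySem.Str.len_eq]
    have := remove1DigitLoop_eq num.toList (num.toList.length - 0) 0 hlen rfl
    simp only [Nat.cast_zero, zero_add, List.take_zero, List.drop_zero, List.nil_append] at this
    rw [this]
  -- evaluate B
  have hB : remove1Digit_alt num = String.ofList (grSpec num.toList) := by
    unfold remove1Digit_alt
    simp only [PySem.Str.len_eq, cands_eq num.toList]
    have hne : candsL num.toList ≠ [] := by rw [hct]; simp [candsL]
    rcases hmin : PySem.List.min? (candsL num.toList) (fun x => x) with _ | m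
    · exact absurd ((PySem.List.min?_eq_none_iff _ _).mp hmin) hne
    · -- the lemmas about min? are stated for the LinearOrder instance; the two
      -- DecidableLT instances on List Char agree (Subsingleton)
      have e : (fun (a b : List Char) => a.decidableLT b) =
          (LinearOrder.toDecidableLT : DecidableLT (List Char)) := Subsingleton.elim _ _
      rw [e] at hmin
      have hmem : m ∈ candsL num.toList :=
        @PySem.List.min?_mem (List Char) (List Char) List.instLT LinearOrder.toDecidableLT
          (candsL num.toList) (fun x => x) m hmin
      have hisMin : ∀ y ∈ candsL num.toList, m ≤ y :=
        @PySem.List.min?_isMin (List Char) (List Char) List.instLinearOrder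
          (candsL num.toList) (fun x => x) m hmin
      have h1 : grSpec num.toList ≤ m := grSpec_min num.toList m hmem
      have h2 : m ≤ grSpec num.toList := hisMin _ (grSpec_mem num.toList hs)
      rw [le_antisymm h2 h1]
  rw [hA, hB]
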